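-- pv_equiv track=rewrite | github.com/KV1k1/3D-GUI | adapters/kivy/silhouette_minigame.py | _build_patterns
-- ===== SOURCE A (Python) =====
-- def _build_patterns(n: int = 6):
--     def empty():
--         return [[0]*n for _ in range(n)]
--
--     def add_rect(p, r0, c0, r1, c1):
--         for r in range(r0, r1+1):
--             for c in range(c0, c1+1):
--                 if 0 <= r < n and 0 <= c < n:
--                     p[r][c] = 1
--     patterns = []
--     p = empty()
--     add_rect(p, 1, 1, 1, 4)
--     add_rect(p, 2, 3, 4, 3)
--     add_rect(p, 4, 1, 4, 2)
--     patterns.append(p)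
--     p = empty()
--     add_rect(p, 1, 2, 4, 3)
--     add_rect(p, 1, 1, 1, 4)
--     patterns.append(p)
--     p = empty()
--     add_rect(p, 1, 2, 4, 3)
--     add_rect(p, 0, 2, 1, 3)
--     add_rect(p, 4, 1, 4, 4)
--     patterns.append(p)
--     p = empty()
--     add_rect(p, 2, 1, 3, 4)
--     add_rect(p, 1, 2, 4, 3)
--     patterns.append(p)
--     p = empty()
--     add_rect(p, 1, 1, 1, 4)
--     add_rect(p, 1, 1, 4, 1)
--     add_rect(p, 4, 1, 4, 4)
--     add_rect(p, 2, 4, 4, 4)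
--     add_rect(p, 2, 2, 2, 3)
--     patterns.append(p)
--     return patterns
-- ===== SOURCE B (Python) =====
-- # B: data-driven — each pattern is a list of rectangles; a cell is 1 iff some
-- # rectangle of its pattern covers it (per-row active-rectangle filter, then a
-- # per-cell column-membership test), instead of A's per-rectangle painting.
-- _RECTS = [
--     [(1, 1, 1, 4), (2, 3, 4, 3), (4, 1, 4, 2)],
--     [(1, 2, 4, 3), (1, 1, 1, 4)],
--     [(1, 2, 4, 3), (0, 2, 1, 3), (4, 1, 4, 4)],
--     [(2, 1, 3, 4), (1, 2, 4, 3)],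
--     [(1, 1, 1, 4), (1, 1, 4, 1), (4, 1, 4, 4), (2, 4, 4, 4), (2, 2, 2, 3)],
-- ]
--
-- def _build_patterns(n: int = 6):
--     patterns = []
--     for rects in _RECTS:
--         grid = []
--         for r in range(n):
--             cols = [(c0, c1) for (r0, c0, r1, c1) in rects if r0 <= r <= r1]
--             if not cols:
--                 grid.append([0] * n)
--             else:
--                 grid.append([1 if any(c0 <= c <= c1 for (c0, c1) in cols) else 0
--                              for c in range(n)])
--         patterns.append(grid)
--     return patterns
-- ===== Notes on version B (the rewrite author's own statement) =====
-- stated objective: alternative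
-- what changed: Replaced A's imperative per-rectangle painting (nested mutation loops clipping each cell write) with a data table of rectangles per pattern and a per-cell any-rectangle-contains membership test over range(n)x range(n).
import Mathlib
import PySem

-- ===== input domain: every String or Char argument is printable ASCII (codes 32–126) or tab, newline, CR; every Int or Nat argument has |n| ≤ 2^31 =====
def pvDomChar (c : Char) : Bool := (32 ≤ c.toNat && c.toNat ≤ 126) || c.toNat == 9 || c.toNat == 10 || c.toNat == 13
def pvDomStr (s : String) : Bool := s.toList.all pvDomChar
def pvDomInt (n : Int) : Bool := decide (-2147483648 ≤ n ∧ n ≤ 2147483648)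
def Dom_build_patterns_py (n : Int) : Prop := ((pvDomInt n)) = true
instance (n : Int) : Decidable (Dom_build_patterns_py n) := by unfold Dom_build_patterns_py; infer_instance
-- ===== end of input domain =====

-- B replaces A's per-rectangle painting loops by a rectangle table with a per-cell membership test (alternative decomposition, same cost).


-- ===== PORT A =====
-- empty(): [[0]*n for _ in range(n)]
def pvEmpty (n : Int) : List (List Int) :=
  (PySem.List.pyRange 0 n 1).map (fun _ => PySem.List.pyRepeat [(0 : Int)] n)

-- add_rect(p, r0, c0, r1, c1): Python mutates p in place; modelled as returning the updated grid
def pvAddRect (n : Int) (p : List (List Int)) (r0 c0 r1 c1 : Int) : List (List Int) :=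
  (PySem.List.pyRange r0 (r1 + 1) 1).foldl (fun p r =>
    (PySem.List.pyRange c0 (c1 + 1) 1).foldl (fun p c =>
      if 0 ≤ r ∧ r < n ∧ 0 ≤ c ∧ c < n then
        PySem.List.pySetD p r (PySem.List.pySetD (PySem.List.pyGetD p r []) c 1)
      else p) p) p

def build_patterns_py (n : Int) : List (List (List Int)) :=
  let p1 := pvAddRect n (pvAddRect n (pvAddRect n (pvEmpty n) 1 1 1 4) 2 3 4 3) 4 1 4 2
  let p2 := pvAddRect n (pvAddRect n (pvEmpty n) 1 2 4 3) 1 1 1 4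
  let p3 := pvAddRect n (pvAddRect n (pvAddRect n (pvEmpty n) 1 2 4 3) 0 2 1 3) 4 1 4 4
  let p4 := pvAddRect n (pvAddRect n (pvEmpty n) 2 1 3 4) 1 2 4 3
  let p5 := pvAddRect n (pvAddRect n (pvAddRect n (pvAddRect n (pvAddRect n (pvEmpty n) 1 1 1 4) 1 1 4 1) 4 1 4 4) 2 4 4 4) 2 2 2 3
  [p1, p2, p3, p4, p5]

-- ===== PORT B =====
-- _RECTS: one rectangle table (r0, c0, r1, c1) per pattern
def pvRects : List (List (Int × Int × Int × Int)) :=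
  [ [(1, 1, 1, 4), (2, 3, 4, 3), (4, 1, 4, 2)],
    [(1, 2, 4, 3), (1, 1, 1, 4)],
    [(1, 2, 4, 3), (0, 2, 1, 3), (4, 1, 4, 4)],
    [(2, 1, 3, 4), (1, 2, 4, 3)],
    [(1, 1, 1, 4), (1, 1, 4, 1), (4, 1, 4, 4), (2, 4, 4, 4), (2, 2, 2, 3)] ]

def build_patterns_py_alt (n : Int) : List (List (List Int)) :=
  pvRects.map (fun rects =>
    (PySem.List.pyRange 0 n 1).map (fun r =>
      let cols := (rects.filter (fun q => decide (q.1 ≤ r ∧ r ≤ q.2.2.1))).map (fun q => (q.2.1, q.2.2.2))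
      if cols.isEmpty then PySem.List.pyRepeat [(0 : Int)] n
      else (PySem.List.pyRange 0 n 1).map (fun c =>
        if cols.any (fun q => decide (q.1 ≤ c ∧ c ≤ q.2)) then (1 : Int) else 0)))

-- ===== PRECONDITION & SPEC =====
def Spec_build_patterns_py (n : Int) (out : List (List (List Int))) : Prop := out = build_patterns_py_alt n
instance (n : Int) (out : List (List (List Int))) : Decidable (Spec_build_patterns_py n out) := by unfold Spec_build_patterns_py; infer_instance

-- ===== CLAIM (what is proved, stated in full; the proofs are below) =====
def Claim_equal_build_patterns_py : Prop := ∀ (n : Int), Dom_build_patterns_py n → Spec_build_patterns_py n (build_patterns_py n)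

-- ===== LEMMAS AND PROOFS =====


def pvTab (n : Int) (f : Int → Int → Int) : List (List Int) :=
  (PySem.List.pyRange 0 n 1).map (fun r => (PySem.List.pyRange 0 n 1).map (fun c => f r c))

theorem pvTab_congr (n : Int) (f g : Int → Int → Int)
    (h : ∀ r c, 0 ≤ r → r < n → 0 ≤ c → c < n → f r c = g r c) :
    pvTab n f = pvTab n g := by
  unfold pvTab
  refine List.map_congr_left (fun r hr => ?_)
  rw [PySem.List.mem_pyRange_one] at hr
  refine List.map_congr_left (fun c hc => ?_)
  rw [PySem.List.mem_pyRange_one] at hc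
  exact h r c hr.1 hr.2 hc.1 hc.2

theorem pvTab_set (n r c : Int) (hr0 : 0 ≤ r) (hrn : r < n) (hc0 : 0 ≤ c) (hcn : c < n)
    (f : Int → Int → Int) :
    PySem.List.pySetD (pvTab n f) r
      (PySem.List.pySetD (PySem.List.pyGetD (pvTab n f) r []) c 1)
    = pvTab n (fun r' c' => if r' = r ∧ c' = c then 1 else f r' c') := by
  have hlen : (pvTab n f).length = n.toNat := by
    simp [pvTab, PySem.List.length_pyRange_one]
  rw [PySem.List.pyGetD_eq_getElem _ _ hr0 (by rw [hlen]; push_cast; omega),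
      PySem.List.pySetD_of_nonneg _ _ hc0,
      PySem.List.pySetD_of_nonneg _ _ hr0]
  apply List.ext_getElem
  · simp [pvTab, PySem.List.length_pyRange_one]
  · intro i h1 h2
    have hi : (i : Int) < n := by
      simp [pvTab, PySem.List.length_pyRange_one] at h1; omega
    by_cases hir : r.toNat = i
    · have hri : r = (i : Int) := by omega
      simp only [List.getElem_set, if_pos hir]
      apply List.ext_getElem
      · simp [pvTab, PySem.List.length_pyRange_one]
      · intro j hj1 hj2
        have hjn : (j : Int) < n := by
          simp [pvTab, PySem.List.length_pyRange_one] at hj2; omega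
        simp only [pvTab, List.getElem_set, List.getElem_map,
          PySem.List.getElem_pyRange_one, zero_add]
        by_cases hjc : c.toNat = j
        · have : c = (j : Int) := by omega
          simp [hri, this, Int.toNat_of_nonneg hr0]
        · have : ¬ ((j : Int) = c) := by omega
          simp [hjc, this, Int.toNat_of_nonneg hr0, hri]
    · have : ¬ ((i : Int) = r) := by omega
      simp only [List.getElem_set, if_neg hir, pvTab, List.getElem_map,
        PySem.List.getElem_pyRange_one, zero_add, this, false_and, if_false]

theorem pvColFold (n r : Int) (c0 b : Int) (f : Int → Int → Int) :
    (PySem.List.pyRange c0 b 1).foldl (fun p c =>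
      if 0 ≤ r ∧ r < n ∧ 0 ≤ c ∧ c < n then
        PySem.List.pySetD p r (PySem.List.pySetD (PySem.List.pyGetD p r []) c 1)
      else p) (pvTab n f)
    = pvTab n (fun r' c => if r' = r ∧ c0 ≤ c ∧ c < b then 1 else f r' c) := by
  by_cases hr : 0 ≤ r ∧ r < n
  · have key : ∀ (t : Nat) (c0 : Int) (f : Int → Int → Int), (b - c0).toNat = t →
        (PySem.List.pyRange c0 b 1).foldl (fun p c =>
          if 0 ≤ r ∧ r < n ∧ 0 ≤ c ∧ c < n then
            PySem.List.pySetD p r (PySem.List.pySetD (PySem.List.pyGetD p r []) c 1)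
          else p) (pvTab n f)
        = pvTab n (fun r' c => if r' = r ∧ c0 ≤ c ∧ c < b then 1 else f r' c) := by
      intro t
      induction t with
      | zero =>
        intro c0 f h
        rw [PySem.List.pyRange_one_eq_nil (by omega)]
        exact pvTab_congr n _ _ (fun r' c _ _ _ _ => by
          rw [if_neg (by omega)])
      | succ t ih =>
        intro c0 f h
        rw [PySem.List.pyRange_one_cons (by omega), List.foldl_cons]
        have hstep : (if 0 ≤ r ∧ r < n ∧ 0 ≤ c0 ∧ c0 < n then
            PySem.List.pySetD (pvTab n f) r
              (PySem.List.pySetD (PySem.List.pyGetD (pvTab n f) r []) c0 1)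
          else pvTab n f)
          = pvTab n (fun r' c' => if r' = r ∧ c' = c0 then 1 else f r' c') := by
          by_cases hc : 0 ≤ c0 ∧ c0 < n
          · rw [if_pos ⟨hr.1, hr.2, hc⟩]
            exact pvTab_set n r c0 hr.1 hr.2 hc.1 hc.2 f
          · rw [if_neg (by tauto)]
            exact pvTab_congr n _ _ (fun r' c' _ _ _ _ => by
              rw [if_neg (by omega)])
        rw [hstep, ih (c0 + 1) _ (by omega)]
        exact pvTab_congr n _ _ (fun r' c _ _ _ _ => by
          split_ifs <;> omega)
    exact key _ c0 f rfl
  · rw [PySem.List.foldl_congr_mem _ _ (fun acc x => acc) _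
      (fun acc x _ => by rw [if_neg (by tauto)]), PySem.List.foldl_ignore]
    exact pvTab_congr n _ _ (fun r' c hr0 hrn _ _ => by
      rw [if_neg (by omega)])

theorem pvAddRect_tab (n r0 c0 r1 c1 : Int) (f : Int → Int → Int) :
    pvAddRect n (pvTab n f) r0 c0 r1 c1
    = pvTab n (fun r c => if r0 ≤ r ∧ r ≤ r1 ∧ c0 ≤ c ∧ c ≤ c1 then 1 else f r c) := by
  unfold pvAddRect
  have key : ∀ (t : Nat) (r0 : Int) (f : Int → Int → Int), (r1 + 1 - r0).toNat = t →
      (PySem.List.pyRange r0 (r1 + 1) 1).foldl (fun p r =>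
        (PySem.List.pyRange c0 (c1 + 1) 1).foldl (fun p c =>
          if 0 ≤ r ∧ r < n ∧ 0 ≤ c ∧ c < n then
            PySem.List.pySetD p r (PySem.List.pySetD (PySem.List.pyGetD p r []) c 1)
          else p) p) (pvTab n f)
      = pvTab n (fun r c => if r0 ≤ r ∧ r ≤ r1 ∧ c0 ≤ c ∧ c ≤ c1 then 1 else f r c) := by
    intro t
    induction t with
    | zero =>
      intro r0 f h
      rw [PySem.List.pyRange_one_eq_nil (a := r0) (b := r1 + 1) (by omega)]
      exact pvTab_congr n _ _ (fun r c _ _ _ _ => by rw [if_neg (by omega)])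
    | succ t ih =>
      intro r0 f h
      rw [PySem.List.pyRange_one_cons (a := r0) (b := r1 + 1) (by omega), List.foldl_cons,
        pvColFold n r0 c0 (c1 + 1) f, ih (r0 + 1) _ (by omega)]
      exact pvTab_congr n _ _ (fun r c _ _ _ _ => by split_ifs <;> omega)
  exact key _ r0 f rfl


theorem pvEmpty_eq_tab (n : Int) : pvEmpty n = pvTab n (fun _ _ => 0) := by
  unfold pvEmpty pvTab
  refine List.map_congr_left (fun r _ => ?_)
  rw [PySem.List.pyRepeat_singleton, List.map_const', PySem.List.length_pyRange_one]
  norm_num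

theorem pvIteOr (P Q : Prop) [Decidable P] [Decidable Q] (x : Int) :
    (if P then (1 : Int) else if Q then 1 else x) = if P ∨ Q then 1 else x := by
  split_ifs <;> tauto

set_option maxHeartbeats 1000000 in
theorem pat1 (n : Int) :
    pvAddRect n (pvAddRect n (pvAddRect n (pvEmpty n) 1 1 1 4) 2 3 4 3) 4 1 4 2
    = (PySem.List.pyRange 0 n 1).map (fun r =>
      (PySem.List.pyRange 0 n 1).map (fun c =>
        if ([((1:Int),(1:Int),(1:Int),(4:Int)), (2, 3, 4, 3), (4, 1, 4, 2)]).any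
             (fun q => decide (q.1 ≤ r ∧ r ≤ q.2.2.1 ∧ q.2.1 ≤ c ∧ c ≤ q.2.2.2))
        then (1 : Int) else 0)) := by
  rw [pvEmpty_eq_tab, pvAddRect_tab, pvAddRect_tab, pvAddRect_tab]
  refine pvTab_congr n _ _ (fun r c _ _ _ _ => ?_)
  simp only [List.any_cons, List.any_nil, Bool.or_eq_true, decide_eq_true_eq, or_false, pvIteOr]
  exact if_congr (by tauto) rfl rfl

set_option maxHeartbeats 1000000 in
theorem pat2 (n : Int) :
    pvAddRect n (pvAddRect n (pvEmpty n) 1 2 4 3) 1 1 1 4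
    = (PySem.List.pyRange 0 n 1).map (fun r =>
      (PySem.List.pyRange 0 n 1).map (fun c =>
        if ([((1:Int),(2:Int),(4:Int),(3:Int)), (1, 1, 1, 4)]).any
             (fun q => decide (q.1 ≤ r ∧ r ≤ q.2.2.1 ∧ q.2.1 ≤ c ∧ c ≤ q.2.2.2))
        then (1 : Int) else 0)) := by
  rw [pvEmpty_eq_tab, pvAddRect_tab, pvAddRect_tab]
  refine pvTab_congr n _ _ (fun r c _ _ _ _ => ?_)
  simp only [List.any_cons, List.any_nil, Bool.or_eq_true, decide_eq_true_eq, or_false, pvIteOr]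
  exact if_congr (by tauto) rfl rfl

set_option maxHeartbeats 1000000 in
theorem pat3 (n : Int) :
    pvAddRect n (pvAddRect n (pvAddRect n (pvEmpty n) 1 2 4 3) 0 2 1 3) 4 1 4 4
    = (PySem.List.pyRange 0 n 1).map (fun r =>
      (PySem.List.pyRange 0 n 1).map (fun c =>
        if ([((1:Int),(2:Int),(4:Int),(3:Int)), (0, 2, 1, 3), (4, 1, 4, 4)]).any
             (fun q => decide (q.1 ≤ r ∧ r ≤ q.2.2.1 ∧ q.2.1 ≤ c ∧ c ≤ q.2.2.2))
        then (1 : Int) else 0)) := by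
  rw [pvEmpty_eq_tab, pvAddRect_tab, pvAddRect_tab, pvAddRect_tab]
  refine pvTab_congr n _ _ (fun r c _ _ _ _ => ?_)
  simp only [List.any_cons, List.any_nil, Bool.or_eq_true, decide_eq_true_eq, or_false, pvIteOr]
  exact if_congr (by tauto) rfl rfl

set_option maxHeartbeats 1000000 in
theorem pat4 (n : Int) :
    pvAddRect n (pvAddRect n (pvEmpty n) 2 1 3 4) 1 2 4 3
    = (PySem.List.pyRange 0 n 1).map (fun r =>
      (PySem.List.pyRange 0 n 1).map (fun c =>
        if ([((2:Int),(1:Int),(3:Int),(4:Int)), (1, 2, 4, 3)]).any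
             (fun q => decide (q.1 ≤ r ∧ r ≤ q.2.2.1 ∧ q.2.1 ≤ c ∧ c ≤ q.2.2.2))
        then (1 : Int) else 0)) := by
  rw [pvEmpty_eq_tab, pvAddRect_tab, pvAddRect_tab]
  refine pvTab_congr n _ _ (fun r c _ _ _ _ => ?_)
  simp only [List.any_cons, List.any_nil, Bool.or_eq_true, decide_eq_true_eq, or_false, pvIteOr]
  exact if_congr (by tauto) rfl rfl

set_option maxHeartbeats 1000000 in
theorem pat5 (n : Int) :
    pvAddRect n (pvAddRect n (pvAddRect n (pvAddRect n (pvAddRect n (pvEmpty n) 1 1 1 4) 1 1 4 1) 4 1 4 4) 2 4 4 4) 2 2 2 3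
    = (PySem.List.pyRange 0 n 1).map (fun r =>
      (PySem.List.pyRange 0 n 1).map (fun c =>
        if ([((1:Int),(1:Int),(1:Int),(4:Int)), (1, 1, 4, 1), (4, 1, 4, 4), (2, 4, 4, 4), (2, 2, 2, 3)]).any
             (fun q => decide (q.1 ≤ r ∧ r ≤ q.2.2.1 ∧ q.2.1 ≤ c ∧ c ≤ q.2.2.2))
        then (1 : Int) else 0)) := by
  rw [pvEmpty_eq_tab, pvAddRect_tab, pvAddRect_tab, pvAddRect_tab, pvAddRect_tab, pvAddRect_tab]
  refine pvTab_congr n _ _ (fun r c _ _ _ _ => ?_)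
  simp only [List.any_cons, List.any_nil, Bool.or_eq_true, decide_eq_true_eq, or_false, pvIteOr]
  exact if_congr (by tauto) rfl rfl


theorem pvAltRow (rects : List (Int × Int × Int × Int)) (n r : Int) :
    (if ((rects.filter (fun q => decide (q.1 ≤ r ∧ r ≤ q.2.2.1))).map (fun q => (q.2.1, q.2.2.2))).isEmpty
     then PySem.List.pyRepeat [(0 : Int)] n
     else (PySem.List.pyRange 0 n 1).map (fun c =>
       if ((rects.filter (fun q => decide (q.1 ≤ r ∧ r ≤ q.2.2.1))).map (fun q => (q.2.1, q.2.2.2))).any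
            (fun q => decide (q.1 ≤ c ∧ c ≤ q.2)) then (1 : Int) else 0))
    = (PySem.List.pyRange 0 n 1).map (fun c =>
        if rects.any (fun q => decide (q.1 ≤ r ∧ r ≤ q.2.2.1 ∧ q.2.1 ≤ c ∧ c ≤ q.2.2.2))
        then (1 : Int) else 0) := by
  have hany : ∀ c : Int,
      ((rects.filter (fun q => decide (q.1 ≤ r ∧ r ≤ q.2.2.1))).map (fun q => (q.2.1, q.2.2.2))).any
        (fun q => decide (q.1 ≤ c ∧ c ≤ q.2))
      = rects.any (fun q => decide (q.1 ≤ r ∧ r ≤ q.2.2.1 ∧ q.2.1 ≤ c ∧ c ≤ q.2.2.2)) := by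
    intro c
    rw [List.any_map, List.any_filter]
    refine PySem.List.any_congr_mem (fun q _ => ?_)
    simp [Bool.and_assoc, and_assoc]
  by_cases he : rects.filter (fun q => decide (q.1 ≤ r ∧ r ≤ q.2.2.1)) = []
  · have hfalse : ∀ c : Int,
        rects.any (fun q => decide (q.1 ≤ r ∧ r ≤ q.2.2.1 ∧ q.2.1 ≤ c ∧ c ≤ q.2.2.2)) = false :=
      fun c => by rw [← hany c, he]; rfl
    rw [if_pos (by rw [List.isEmpty_iff, List.map_eq_nil_iff]; exact he), PySem.List.pyRepeat_singleton]
    rw [List.map_congr_left (fun c _ => by rw [hfalse c, if_neg]; simp),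
      List.map_const', PySem.List.length_pyRange_one]
    norm_num
  · rw [if_neg (by rw [List.isEmpty_iff, List.map_eq_nil_iff]; exact he)]
    exact List.map_congr_left (fun c _ => by rw [hany c])

-- ===== VERDICT (by name: the statement is the Claim_ definition above) =====
set_option maxHeartbeats 1000000 in
theorem build_patterns_py_spec : Claim_equal_build_patterns_py := by
  intro n _
  unfold Spec_build_patterns_py
  have halt : build_patterns_py_alt n = pvRects.map (fun rects =>
      (PySem.List.pyRange 0 n 1).map (fun r =>
        (PySem.List.pyRange 0 n 1).map (fun c =>
          if rects.any (fun q => decide (q.1 ≤ r ∧ r ≤ q.2.2.1 ∧ q.2.1 ≤ c ∧ c ≤ q.2.2.2))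
          then (1 : Int) else 0))) := by
    unfold build_patterns_py_alt
    exact List.map_congr_left (fun rects _ =>
      List.map_congr_left (fun r _ => pvAltRow rects n r))
  rw [halt]
  simp only [build_patterns_py, pvRects, List.map_cons, List.map_nil]
  rw [pat1 n, pat2 n, pat3 n, pat4 n, pat5 n]
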